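-- pv_equiv track=rewrite | github.com/taejune/my-algo-solvings | src/com/taejune/algorithm/acmp/15990/solve.py | count
-- ===== SOURCE A (Python) =====
-- def count(n):
-- 	d = {};
-- 	d[1] = {1: 1, 2: 0, 3: 0};
-- 	d[2] = {1: 0, 2: 1, 3: 0};
-- 	d[3] = {1: 1, 2: 1, 3: 1};
--
-- 	if n < 4:
-- 		return d;
--
-- 	for i in range(4, n+1):
-- 		d[i] = dict();
-- 		d[i][1] = d[i-1][2] + d[i-1][3];
-- 		d[i][2] = d[i-2][1] + d[i-2][3];
-- 		d[i][3] = d[i-3][1] + d[i-3][2];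
--
-- 	return d;
-- ===== SOURCE B (Python) =====
-- def count(n):
--     memo = {1: {1: 1, 2: 0, 3: 0}, 2: {1: 0, 2: 1, 3: 0}, 3: {1: 1, 2: 1, 3: 1}}
--     stack = [n] if n >= 4 else []
--     while stack:
--         i = stack[-1]
--         if i in memo:
--             stack.pop()
--         elif i - 1 in memo:
--             # memo keys stay contiguous from 1, so i-2 and i-3 are present as well
--             memo[i] = {1: memo[i - 1][2] + memo[i - 1][3],
--                        2: memo[i - 2][1] + memo[i - 2][3],
--                        3: memo[i - 3][1] + memo[i - 3][2]}
--             stack.pop()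
--         else:
--             stack.append(i - 1)
--     return memo
-- ===== Notes on version B (the rewrite author's own statement) =====
-- stated objective: alternative
-- what changed: Replaces A's bottom-up for-loop table fill with a demand-driven top-down memoization: an explicit worklist stack (iterative DFS on the dependency chain) that pushes missing predecessors and computes an entry only when its dependencies are memoized.
import Mathlib
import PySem

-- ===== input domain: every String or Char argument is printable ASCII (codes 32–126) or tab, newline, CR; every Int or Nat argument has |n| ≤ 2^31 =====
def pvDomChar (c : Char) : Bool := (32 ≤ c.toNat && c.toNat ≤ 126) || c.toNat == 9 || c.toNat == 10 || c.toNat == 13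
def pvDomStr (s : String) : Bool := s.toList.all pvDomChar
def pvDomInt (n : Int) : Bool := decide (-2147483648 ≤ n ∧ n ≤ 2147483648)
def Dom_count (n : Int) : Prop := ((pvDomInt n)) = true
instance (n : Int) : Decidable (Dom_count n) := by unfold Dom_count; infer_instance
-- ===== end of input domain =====

-- B replaces A's bottom-up for-loop table fill by a demand-driven top-down memoization with an
-- explicit worklist stack (iterative DFS on the dependency chain); objective: alternative, same O(n).

-- ===== PORT A =====
-- d[i][j] on a dict-of-dicts (keys always present when A reads them)
def dGet (d : List (Int × List (Int × Int))) (i j : Int) : Int :=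
  (((d.lookup i).getD []).lookup j).getD 0

def count (n : Int) : List (Int × List (Int × Int)) :=
  let d : List (Int × List (Int × Int)) :=
    [(1, [(1,1),(2,0),(3,0)]), (2, [(1,0),(2,1),(3,0)]), (3, [(1,1),(2,1),(3,1)])]
  if n < 4 then d
  else
    (PySem.List.pyRange 4 (n+1) 1).foldl
      (fun d i =>
        d ++ [(i, [(1, dGet d (i-1) 2 + dGet d (i-1) 3),
                   (2, dGet d (i-2) 1 + dGet d (i-2) 3),
                   (3, dGet d (i-3) 1 + dGet d (i-3) 2)])]) d

-- ===== PORT B =====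
-- memo[i][j] on the memo dict (keys present whenever B reads them)
def mGet (d : List (Int × List (Int × Int))) (i j : Int) : Int :=
  (((d.lookup i).getD []).lookup j).getD 0

-- the while-loop over the worklist; the list HEAD models the END of the Python list (top of
-- stack: stack[-1] = head, append = cons, pop = tail).  The keys inserted into memo are fresh
-- and larger than all present keys, so dict insertion appends.  Python's 'while stack:' has no
-- fuel; the fuel only makes the same computation total, and 2*(n-3) steps are proved sufficient.
def goB (fuel : Nat) (memo : List (Int × List (Int × Int))) (stack : List Int) :
    List (Int × List (Int × Int)) :=
  match fuel, stack with
  | 0, _ => memo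
  | _ + 1, [] => memo
  | fuel + 1, i :: rest =>
    if ((memo.lookup i).isSome : Bool) then goB fuel memo rest
    else if ((memo.lookup (i-1)).isSome : Bool) then
      goB fuel
        (memo ++ [(i, [(1, mGet memo (i-1) 2 + mGet memo (i-1) 3),
                       (2, mGet memo (i-2) 1 + mGet memo (i-2) 3),
                       (3, mGet memo (i-3) 1 + mGet memo (i-3) 2)])]) rest
    else goB fuel memo ((i-1) :: i :: rest)

def count_alt (n : Int) : List (Int × List (Int × Int)) :=
  let memo : List (Int × List (Int × Int)) :=
    [(1, [(1,1),(2,0),(3,0)]), (2, [(1,0),(2,1),(3,0)]), (3, [(1,1),(2,1),(3,1)])]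
  let stack : List Int := if 4 ≤ n then [n] else []
  goB (2 * (n - 3)).toNat memo stack

-- ===== PRECONDITION & SPEC =====
def Spec_count (n : Int) (out : List (Int × List (Int × Int))) : Prop := out = count_alt n
instance (n : Int) (out : List (Int × List (Int × Int))) : Decidable (Spec_count n out) := by unfold Spec_count; infer_instance

-- ===== CLAIM (what is proved, stated in full; the proofs are below) =====
def Claim_equal_count : Prop := ∀ (n : Int), Dom_count n → Spec_count n (count n)

-- ===== LEMMAS AND PROOFS =====

-- pvF k = (#ways ending in 1, in 2, in 3) for target k+1
def pvF : Nat → Int × Int × Int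
  | 0 => (1,0,0)
  | 1 => (0,1,0)
  | 2 => (1,1,1)
  | k+3 => ((pvF (k+2)).2.1 + (pvF (k+2)).2.2,
            (pvF (k+1)).1 + (pvF (k+1)).2.2,
            (pvF k).1 + (pvF k).2.1)

def pvInner (k : Nat) : List (Int × Int) := [(1,(pvF k).1),(2,(pvF k).2.1),(3,(pvF k).2.2)]

def pvDA (j : Nat) : List (Int × List (Int × Int)) :=
  (List.range j).map (fun (k : Nat) => ((k:Int)+1, pvInner k))

lemma pv_lookup_append {α β : Type} [BEq α] (l1 l2 : List (α × β)) (a : α) :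
    List.lookup a (l1 ++ l2) = (List.lookup a l1).or (List.lookup a l2) := by
  induction l1 with
  | nil => simp
  | cons p t ih => cases hpa : (a == p.1) <;> simp [List.lookup, hpa, ih]

lemma pv_lookup_range_none {α : Type} (g : Nat → α) (j k : Nat) (h : j ≤ k) :
    List.lookup ((k:Int)+1) ((List.range j).map (fun (i : Nat) => ((i:Int)+1, g i))) = none := by
  induction j with
  | zero => rfl
  | succ j ih =>
    rw [List.range_succ, List.map_append, pv_lookup_append, ih (by omega)]
    have hne : (((k:Int)+1) == ((j:Int)+1)) = false := by
      simp only [beq_eq_false_iff_ne, ne_eq]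
      omega
    simp [List.lookup, hne]

lemma pv_lookup_range {α : Type} (g : Nat → α) (j k : Nat) (h : k < j) :
    List.lookup ((k:Int)+1) ((List.range j).map (fun (i : Nat) => ((i:Int)+1, g i))) = some (g k) := by
  induction j with
  | zero => omega
  | succ j ih =>
    rw [List.range_succ, List.map_append, pv_lookup_append]
    by_cases hk : k < j
    · rw [ih hk]; rfl
    · have hkj : k = j := by omega
      subst hkj
      rw [pv_lookup_range_none g k k le_rfl]
      simp

lemma pvInner_1 (k : Nat) : ((pvInner k).lookup 1).getD 0 = (pvF k).1 := by
  simp [pvInner]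
lemma pvInner_2 (k : Nat) : ((pvInner k).lookup 2).getD 0 = (pvF k).2.1 := by
  simp [pvInner, List.lookup]
lemma pvInner_3 (k : Nat) : ((pvInner k).lookup 3).getD 0 = (pvF k).2.2 := by
  simp [pvInner, List.lookup]

lemma dGet_pvDA (j k : Nat) (h : k < j) (t : Int) :
    dGet (pvDA j) ((k:Int)+1) t = ((pvInner k).lookup t).getD 0 := by
  simp [dGet, pvDA, pv_lookup_range _ j k h]

def pvStepA (d : List (Int × List (Int × Int))) (i : Int) : List (Int × List (Int × Int)) :=
  d ++ [(i, [(1, dGet d (i-1) 2 + dGet d (i-1) 3),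
             (2, dGet d (i-2) 1 + dGet d (i-2) 3),
             (3, dGet d (i-3) 1 + dGet d (i-3) 2)])]

lemma pvDA_succ (j : Nat) : pvDA (j+1) = pvDA j ++ [((j:Int)+1, pvInner j)] := by
  simp [pvDA, List.range_succ]

lemma loopA (m : Nat) :
    (PySem.List.pyRange 4 ((m:Int)+4) 1).foldl pvStepA (pvDA 3) = pvDA (m+3) := by
  induction m with
  | zero =>
    rw [PySem.List.pyRange_one_eq_nil (by norm_num)]
    rfl
  | succ m ih =>
    rw [show (((m+1:Nat)):Int) + 4 = ((m:Int)+4)+1 by push_cast; ring,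
        PySem.List.pyRange_one_succ_right (by omega), List.foldl_append, ih]
    simp only [List.foldl_cons, List.foldl_nil, pvStepA]
    rw [show (m:Int)+4-1 = ((m+2:Nat):Int)+1 by push_cast; ring,
        show (m:Int)+4-2 = ((m+1:Nat):Int)+1 by push_cast; ring,
        show (m:Int)+4-3 = ((m:Nat):Int)+1 by omega,
        dGet_pvDA (m+3) (m+2) (by omega), dGet_pvDA (m+3) (m+2) (by omega),
        dGet_pvDA (m+3) (m+1) (by omega), dGet_pvDA (m+3) (m+1) (by omega),
        dGet_pvDA (m+3) m (by omega), dGet_pvDA (m+3) m (by omega),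
        pvInner_2, pvInner_3, pvInner_1, pvInner_3, pvInner_1, pvInner_2]
    rw [show m+1+3 = (m+3)+1 by omega, pvDA_succ (m+3)]
    have hF : pvF (m+3) = ((pvF (m+2)).2.1 + (pvF (m+2)).2.2,
                          (pvF (m+1)).1 + (pvF (m+1)).2.2,
                          (pvF m).1 + (pvF m).2.1) := rfl
    rw [show ((m+3:Nat):Int)+1 = (m:Int)+4 by push_cast; ring]
    simp [pvInner, hF]

lemma count_eq_pvDA (n : Int) : count n = pvDA (max n 3).toNat := by
  unfold count
  by_cases h : n < 4
  · rw [if_pos h, show (max n 3).toNat = 3 by omega]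
    simp [pvDA, pvInner, pvF, List.range_succ]
  · rw [if_neg h]
    obtain ⟨m, hm⟩ : ∃ m : Nat, n = (m:Int) + 4 := ⟨(n-4).toNat, by omega⟩
    subst hm
    rw [show (m:Int)+4+1 = ((m+1:Nat):Int)+4 by push_cast; ring,
        show (max ((m:Int)+4) 3).toNat = (m+1)+3 by omega]
    exact loopA (m+1)

-- ===== B side =====

-- the worklist [a+1, a+2, …, b] as Ints (head = top of stack)
def pvStk (a b : Nat) : List Int := (List.range' (a+1) (b-a)).map (fun k => (k : Int))

lemma pvStk_cons (a b : Nat) (h : a < b) :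
    pvStk a b = ((a:Int)+1) :: pvStk (a+1) b := by
  unfold pvStk
  rw [show b - a = (b-(a+1))+1 by omega]
  rfl

lemma pvStk_nil (a : Nat) : pvStk a a = [] := by
  simp [pvStk]

lemma goB_nil (f : Nat) (memo : List (Int × List (Int × Int))) :
    goB f memo [] = memo := by
  cases f <;> rfl

lemma mGet_eq_dGet : mGet = dGet := rfl

lemma pvDA_lookup_isSome_false (j k : Nat) (h : j ≤ k) :
    ((pvDA j).lookup ((k:Int)+1)).isSome = false := by
  rw [pvDA, pv_lookup_range_none _ j k h]
  rfl

lemma pvDA_lookup_isSome_true (j k : Nat) (h : k < j) :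
    ((pvDA j).lookup ((k:Int)+1)).isSome = true := by
  rw [pvDA, pv_lookup_range _ j k h]
  rfl

-- unwinding: with memo = 1..q+3 contiguous and stack [q+4, ..., q+3+d], each step computes the
-- next key; d steps of fuel plus any spare e suffice
lemma goB_unwind (e : Nat) (d : Nat) : ∀ q : Nat,
    goB (d + e) (pvDA (q+3)) (pvStk (q+3) (q+3+d)) = pvDA (q+3+d) := by
  induction d with
  | zero =>
    intro q
    rw [show q+3+0 = q+3 by omega, pvStk_nil, goB_nil]
  | succ d ih =>
    intro q
    rw [pvStk_cons (q+3) (q+3+(d+1)) (by omega),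
        show d + 1 + e = (d + e) + 1 by omega, goB]
    rw [pvDA_lookup_isSome_false (q+3) (q+3) (by omega)]
    simp only [Bool.false_eq_true, if_false]
    rw [show ((q+3:Nat):Int)+1-1 = ((q+2:Nat):Int)+1 by push_cast; ring,
        pvDA_lookup_isSome_true (q+3) (q+2) (by omega)]
    simp only [if_true]
    rw [show ((q+3:Nat):Int)+1-2 = ((q+1:Nat):Int)+1 by push_cast; ring,
        show ((q+3:Nat):Int)+1-3 = ((q:Nat):Int)+1 by push_cast; ring,
        mGet_eq_dGet,
        dGet_pvDA (q+3) (q+2) (by omega), dGet_pvDA (q+3) (q+2) (by omega),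
        dGet_pvDA (q+3) (q+1) (by omega), dGet_pvDA (q+3) (q+1) (by omega),
        dGet_pvDA (q+3) q (by omega), dGet_pvDA (q+3) q (by omega),
        pvInner_2, pvInner_3, pvInner_1, pvInner_3, pvInner_1, pvInner_2]
    have hF : pvF (q+3) = ((pvF (q+2)).2.1 + (pvF (q+2)).2.2,
                          (pvF (q+1)).1 + (pvF (q+1)).2.2,
                          (pvF q).1 + (pvF q).2.1) := rfl
    have hmemo : pvDA (q+3) ++ [(((q+3:Nat):Int)+1,
        [(1, (pvF (q+2)).2.1 + (pvF (q+2)).2.2),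
         (2, (pvF (q+1)).1 + (pvF (q+1)).2.2),
         (3, (pvF q).1 + (pvF q).2.1)])] = pvDA (q+4) := by
      rw [show q+4 = (q+3)+1 by omega, pvDA_succ (q+3)]
      simp [pvInner, hF]
    rw [hmemo, show q+3+(d+1) = q+1+3+d by omega]
    exact ih (q+1)

-- descending: keys above the memo frontier are pushed one by one; each push costs one fuel
lemma goB_descend (fuel d : Nat) : ∀ r : Nat,
    goB (fuel + d) (pvDA 3) (pvStk (3+d) (4+d+r)) = goB fuel (pvDA 3) (pvStk 3 (4+d+r)) := by
  induction d with
  | zero => intro r; rfl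
  | succ d ih =>
    intro r
    rw [pvStk_cons (3+(d+1)) (4+(d+1)+r) (by omega),
        show fuel + (d+1) = (fuel + d) + 1 by omega, goB]
    rw [show ((3+(d+1):Nat):Int)+1 = ((4+d:Nat):Int)+1 by push_cast; ring]
    rw [pvDA_lookup_isSome_false 3 (4+d) (by omega)]
    simp only [Bool.false_eq_true, if_false]
    rw [show ((4+d:Nat):Int)+1-1 = ((3+d:Nat):Int)+1 by push_cast; ring]
    rw [pvDA_lookup_isSome_false 3 (3+d) (by omega)]
    simp only [Bool.false_eq_true, if_false]
    have hstk : (((3+d:Nat):Int)+1) :: (((4+d:Nat):Int)+1) :: pvStk (3+(d+1)+1) (4+(d+1)+r)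
        = pvStk (3+d) (4+d+(r+1)) := by
      rw [pvStk_cons (3+d) (4+d+(r+1)) (by omega),
          pvStk_cons (3+d+1) (4+d+(r+1)) (by omega)]
      congr 2
      · push_cast; ring
      · congr 1; omega
    rw [hstk, ih (r+1), show 4+d+(r+1) = 4+(d+1)+r by omega]

lemma count_alt_eq_pvDA (n : Int) : count_alt n = pvDA (max n 3).toNat := by
  unfold count_alt
  by_cases h : 4 ≤ n
  · rw [if_pos h]
    obtain ⟨m, hm⟩ : ∃ m : Nat, n = (m:Int) + 4 := ⟨(n-4).toNat, by omega⟩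
    subst hm
    rw [show (2 * ((m:Int) + 4 - 3)).toNat = (m+2) + m by omega]
    have hbase : ([(1, [(1,1),(2,0),(3,0)]), (2, [(1,0),(2,1),(3,0)]), (3, [(1,1),(2,1),(3,1)])]
        : List (Int × List (Int × Int))) = pvDA 3 := by decide
    rw [hbase]
    have hstart : ([((m:Int)+4)] : List Int) = pvStk (3+m) (4+m+0) := by
      rw [pvStk_cons (3+m) (4+m+0) (by omega), show 3+m+1 = 4+m+0 by omega, pvStk_nil]
      congr 1
      push_cast
      ring
    rw [hstart, goB_descend (m+2) m 0]
    have hu := goB_unwind 1 (m+1) 0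
    rw [show (4+m+0) = 0+3+(m+1) by omega,
        show (max ((m:Int)+4) 3).toNat = 0+3+(m+1) by omega]
    exact hu
  · rw [if_neg h, show (max n 3).toNat = 3 by omega, goB_nil]
    decide

-- ===== VERDICT (by name: the statement is the Claim_ definition above) =====
theorem count_spec : Claim_equal_count := by
  intro n _
  unfold Spec_count
  rw [count_eq_pvDA, count_alt_eq_pvDA]
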